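-- pv_equiv track=rewrite | github.com/jim0607/Leetcode | Solutions/0668.Kth-Smallest-Number-in-Multiplication-Table.py | _has_more
-- ===== SOURCE A (Python) =====
-- def _has_more(m, n, k, val):    # check if there is more than k numbers less than mid - O(M+N)
--     cnt = 0
--     i, j = m, 1     # 从左下角出发
--     while i >= 1 and j <= n:
--         if i * j <= val:
--             cnt += i    # i * j <= val, then j times all numbes on top of i will be less than val
--             j += 1      # 既然这一列都满足了我们去看下一列
--         else:
--             i -= 1
--     return cnt >= k      # 往左逼近
-- ===== SOURCE B (Python) =====
-- def _has_more(m, n, k, val):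
--     cnt = 0
--     if n > 0:
--         for i in range(1, min(m, val) + 1):
--             cnt += min(n, val // i)
--     return cnt >= k
-- ===== Notes on version B (the rewrite author's own statement) =====
-- stated objective: simpler
-- what changed: Replaces the interdependent two-pointer staircase walk (i down from m, j right across columns) with a single independent loop over rows i = 1 .. min(m, val) accumulating min(n, val // i), the arithmetic count of entries <= val in row i (zero when n <= 0).
import Mathlib
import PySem

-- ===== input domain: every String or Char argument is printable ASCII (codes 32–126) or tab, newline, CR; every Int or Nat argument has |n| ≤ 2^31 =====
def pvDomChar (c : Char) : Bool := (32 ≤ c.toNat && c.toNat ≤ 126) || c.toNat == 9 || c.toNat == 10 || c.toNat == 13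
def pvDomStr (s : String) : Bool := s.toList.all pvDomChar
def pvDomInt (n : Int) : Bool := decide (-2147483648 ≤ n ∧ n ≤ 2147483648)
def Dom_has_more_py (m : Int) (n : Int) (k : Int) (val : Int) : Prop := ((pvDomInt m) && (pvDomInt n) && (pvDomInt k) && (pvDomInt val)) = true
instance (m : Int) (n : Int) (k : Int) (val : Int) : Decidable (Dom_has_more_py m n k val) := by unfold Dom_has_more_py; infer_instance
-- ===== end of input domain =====

-- B replaces the two-pointer staircase with an independent per-row arithmetic count
-- (cnt += min(n, val // i) for rows i = 1 .. min(m, val), when n > 0), a simpler single loop;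
-- same return value.

-- ===== PORT A =====
-- the while-loop of A: state (cnt, i, j), i walks down from m, j walks right from 1;
-- the Nat argument is fuel bounding the iteration count (each step decreases i + n - j + 1)
def hasMoreLoopA (n val : Int) : Nat → Int → Int → Int → Int
  | 0, cnt, _i, _j => cnt
  | N + 1, cnt, i, j =>
    if 1 ≤ i ∧ j ≤ n then
      if i * j ≤ val then
        hasMoreLoopA n val N (cnt + i) i (j + 1)
      else
        hasMoreLoopA n val N cnt (i - 1) j
    else
      cnt

def has_more_py (m : Int) (n : Int) (k : Int) (val : Int) : Bool :=
  decide (hasMoreLoopA n val (m + n).toNat 0 m 1 ≥ k)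

-- ===== PORT B =====
def has_more_py_alt (m : Int) (n : Int) (k : Int) (val : Int) : Bool :=
  decide ((if 0 < n then
            (PySem.List.pyRange 1 (min m val + 1) 1).foldl
              (fun cnt i => cnt + min n (PySem.Int.floordiv val i)) 0
           else 0) ≥ k)

-- ===== PRECONDITION & SPEC =====
def Spec_has_more_py (m : Int) (n : Int) (k : Int) (val : Int) (out : Bool) : Prop := out = has_more_py_alt m n k val
instance (m : Int) (n : Int) (k : Int) (val : Int) (out : Bool) : Decidable (Spec_has_more_py m n k val out) := by unfold Spec_has_more_py; infer_instance

-- ===== CLAIM (what is proved, stated in full; the proofs are below) =====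
def Claim_equal_has_more_py : Prop := ∀ (m : Int) (n : Int) (k : Int) (val : Int), Dom_has_more_py m n k val → Spec_has_more_py m n k val (has_more_py m n k val)

-- ===== LEMMAS AND PROOFS =====

-- A's loop adds, per processed column t, exactly max 0 (min i (val // t)) entries
theorem loopA_eq (n val : Int) :
    ∀ (N : ℕ) (cnt i j : Int), (i + n - j + 1).toNat ≤ N → 0 ≤ i → 1 ≤ j →
      hasMoreLoopA n val N cnt i j
        = cnt + ∑ t ∈ Finset.Icc j n, max 0 (min i (PySem.Int.floordiv val t)) := by
  intro N
  induction N with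
  | zero =>
    intro cnt i j hN hi hj
    have hnj : n < j := by omega
    rw [hasMoreLoopA]
    rw [Finset.Icc_eq_empty (by omega), Finset.sum_empty]
    omega
  | succ N ih =>
    intro cnt i j hN hi hj
    rw [hasMoreLoopA]
    by_cases h : 1 ≤ i ∧ j ≤ n
    · rw [if_pos h]
      by_cases hle : i * j ≤ val
      · rw [if_pos hle]
        rw [ih (cnt + i) i (j + 1) (by omega) hi (by omega)]
        have hsplit : Finset.Icc j n = insert j (Finset.Icc (j + 1) n) := by
          ext x; simp [Finset.mem_Icc]; omega
        rw [hsplit, Finset.sum_insert (by simp [Finset.mem_Icc])]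
        have hfd : i ≤ PySem.Int.floordiv val j :=
          (PySem.Int.le_floordiv_iff_mul_le (by omega)).mpr hle
        have : max 0 (min i (PySem.Int.floordiv val j)) = i := by omega
        rw [this]; omega
      · rw [if_neg hle]
        rw [ih cnt (i - 1) j (by omega) (by omega) hj]
        congr 1
        apply Finset.sum_congr rfl
        intro t ht
        simp only [Finset.mem_Icc] at ht
        have hij : i * j ≤ i * t := mul_le_mul_of_nonneg_left ht.1 hi
        have hfd : PySem.Int.floordiv val t < i :=
          (PySem.Int.floordiv_lt_iff_lt_mul (by omega)).mpr (by omega)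
        omega
    · rw [if_neg h]
      by_cases hjn : j ≤ n
      · have hi0 : i = 0 := by omega
        rw [Finset.sum_eq_zero (fun t _ => by omega)]
        omega
      · rw [Finset.Icc_eq_empty (by omega), Finset.sum_empty]
        omega

-- one row/column count as a 0/1 double-count row
theorem term_eq_sum (a t val : Int) (ha : 0 ≤ a) (ht : 1 ≤ t) :
    max 0 (min a (PySem.Int.floordiv val t))
      = ∑ s ∈ Finset.Icc (1 : Int) a, (if s * t ≤ val then (1 : Int) else 0) := by
  rw [Finset.sum_boole]
  have hfilter : (Finset.Icc (1 : Int) a).filter (fun s => s * t ≤ val)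
      = Finset.Icc (1 : Int) (min a (PySem.Int.floordiv val t)) := by
    ext x
    simp only [Finset.mem_filter, Finset.mem_Icc, le_min_iff]
    constructor
    · rintro ⟨⟨h1, h2⟩, h3⟩
      exact ⟨h1, h2, (PySem.Int.le_floordiv_iff_mul_le (by omega)).mpr h3⟩
    · rintro ⟨h1, h2, h3⟩
      exact ⟨⟨h1, h2⟩, (PySem.Int.le_floordiv_iff_mul_le (by omega)).mp h3⟩
  rw [hfilter, Int.card_Icc]
  omega

-- double counting: per-column totals equal per-row totals
theorem swap_sum (m n val : Int) (hm : 0 ≤ m) (hn : 0 ≤ n) :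
    (∑ t ∈ Finset.Icc (1 : Int) n, max 0 (min m (PySem.Int.floordiv val t)))
      = ∑ s ∈ Finset.Icc (1 : Int) m, max 0 (min n (PySem.Int.floordiv val s)) := by
  rw [Finset.sum_congr rfl
      (fun t ht => term_eq_sum m t val hm (by simp [Finset.mem_Icc] at ht; omega))]
  rw [Finset.sum_comm]
  apply Finset.sum_congr rfl
  intro s hs
  rw [term_eq_sum n s val hn (by simp [Finset.mem_Icc] at hs; omega)]
  exact Finset.sum_congr rfl (fun t _ => by rw [mul_comm])

-- B's fold over range(1, b+1) is the per-row Finset sum (nonnegative bound)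
theorem foldB_aux (n val : Int) :
    ∀ (M : ℕ),
      (PySem.List.pyRange 1 ((M : Int) + 1) 1).foldl
          (fun cnt i => cnt + min n (PySem.Int.floordiv val i)) 0
        = ∑ s ∈ Finset.Icc (1 : Int) (M : Int), min n (PySem.Int.floordiv val s) := by
  intro M
  induction M with
  | zero =>
    rw [PySem.List.pyRange_one_eq_nil (by omega)]
    simp
  | succ M ih =>
    have hcast : ((M + 1 : ℕ) : Int) = (M : Int) + 1 := by push_cast; ring
    rw [hcast, PySem.List.pyRange_one_succ_right (by omega), List.foldl_append]
    have hsplit : Finset.Icc (1 : Int) ((M : Int) + 1)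
        = insert ((M : Int) + 1) (Finset.Icc (1 : Int) (M : Int)) := by
      ext x; simp [Finset.mem_Icc]; omega
    rw [hsplit, Finset.sum_insert (by simp [Finset.mem_Icc])]
    simp only [List.foldl_cons, List.foldl_nil, ih]
    omega

-- B's fold for an arbitrary (possibly negative) upper bound b
theorem foldB_eq (n val b : Int) :
    (PySem.List.pyRange 1 (b + 1) 1).foldl
        (fun cnt i => cnt + min n (PySem.Int.floordiv val i)) 0
      = ∑ s ∈ Finset.Icc (1 : Int) b, min n (PySem.Int.floordiv val s) := by
  by_cases hb : 0 ≤ b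
  · obtain ⟨M, hM⟩ := Int.eq_ofNat_of_zero_le hb
    rw [hM]; exact foldB_aux n val M
  · rw [PySem.List.pyRange_one_eq_nil (by omega),
        Finset.Icc_eq_empty (show ¬ (1 : Int) ≤ b by omega), Finset.sum_empty]
    rfl

-- rows above min(m, val) contribute nothing, and below it the clamp at 0 is vacuous
theorem trim_sum (m n val : Int) (hn : 0 < n) :
    (∑ s ∈ Finset.Icc (1 : Int) m, max 0 (min n (PySem.Int.floordiv val s)))
      = ∑ s ∈ Finset.Icc (1 : Int) (min m val), min n (PySem.Int.floordiv val s) := by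
  rw [← Finset.sum_subset (Finset.Icc_subset_Icc_right (min_le_left m val))
      (fun x hx hnx => by
        simp only [Finset.mem_Icc] at hx hnx
        have hfd : PySem.Int.floordiv val x < 1 :=
          (PySem.Int.floordiv_lt_iff_lt_mul (by omega)).mpr (by omega)
        omega)]
  apply Finset.sum_congr rfl
  intro s hs
  simp only [Finset.mem_Icc] at hs
  have hfd : 1 ≤ PySem.Int.floordiv val s :=
    (PySem.Int.le_floordiv_iff_mul_le (by omega)).mpr (by omega)
  omega

-- ===== VERDICT (by name: the statement is the Claim_ definition above) =====
theorem has_more_py_spec : Claim_equal_has_more_py := by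
  intro m n k val _
  unfold Spec_has_more_py has_more_py has_more_py_alt
  congr 1
  by_cases hm : 0 ≤ m
  · have hA := loopA_eq n val (m + n).toNat 0 m 1 (by omega) hm (by omega)
    rw [hA, foldB_eq n val (min m val)]
    by_cases hn : 0 < n
    · rw [if_pos hn, swap_sum m n val hm (by omega), trim_sum m n val hn]
      norm_num
    · rw [if_neg hn,
          Finset.Icc_eq_empty (show ¬ (1 : Int) ≤ n by omega), Finset.sum_empty]
      norm_num
  · have h1 : hasMoreLoopA n val (m + n).toNat 0 m 1 = 0 := by
      cases hN : (m + n).toNat with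
      | zero => rfl
      | succ N => rw [hasMoreLoopA, if_neg (by omega)]
    have h2 : (PySem.List.pyRange 1 (min m val + 1) 1).foldl
        (fun cnt i => cnt + min n (PySem.Int.floordiv val i)) 0 = 0 := by
      rw [PySem.List.pyRange_one_eq_nil (by omega)]
      rfl
    rw [h1, h2]
    simp
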